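-- pv_equiv track=rewrite | github.com/neelabhmondal20-coder/Python-Programss | main (12).py | rotate_anticlockwise
-- ===== SOURCE A (Python) =====
-- def rotate_anticlockwise(mat):
--     n = len(mat)
--
--     # Step 1: Transpose the matrix
--     for i in range(n):
--         for j in range(i, n):
--             mat[i][j], mat[j][i] = mat[j][i], mat[i][j]
--
--     # Step 2: Reverse each column
--     for col in range(n):
--         for row in range(n // 2):
--             mat[row][col], mat[n - 1 - row][col] = mat[n - 1 - row][col], mat[row][col]
--
--     return mat
-- ===== SOURCE B (Python) =====
-- # Rebuild the rotated matrix directly (new[i][j] = old[j][n-1-i]) and splice it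
-- # into mat in place via mat[:] = ..., instead of A's transpose-then-reverse swaps.
-- def rotate_anticlockwise(mat):
--     n = len(mat)
--     mat[:] = [[mat[j][n - 1 - i] for j in range(n)] for i in range(n)]
--     return mat
-- ===== Notes on version B (the rewrite author's own statement) =====
-- stated objective: simpler
-- what changed: B builds the rotated matrix directly with a double comprehension (new[i][j] = old[j][n-1-i]) and splices it into mat via mat[:] = ..., instead of A's two in-place swap passes (transpose, then reverse each column).
-- outside the precondition, e.g. on rotate_anticlockwise([[1, 2, 3], [4, 5, 6]]): A returns [[2, 5, 3], [1, 4, 6]], B returns [[2, 5], [1, 4]]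
import Mathlib
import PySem

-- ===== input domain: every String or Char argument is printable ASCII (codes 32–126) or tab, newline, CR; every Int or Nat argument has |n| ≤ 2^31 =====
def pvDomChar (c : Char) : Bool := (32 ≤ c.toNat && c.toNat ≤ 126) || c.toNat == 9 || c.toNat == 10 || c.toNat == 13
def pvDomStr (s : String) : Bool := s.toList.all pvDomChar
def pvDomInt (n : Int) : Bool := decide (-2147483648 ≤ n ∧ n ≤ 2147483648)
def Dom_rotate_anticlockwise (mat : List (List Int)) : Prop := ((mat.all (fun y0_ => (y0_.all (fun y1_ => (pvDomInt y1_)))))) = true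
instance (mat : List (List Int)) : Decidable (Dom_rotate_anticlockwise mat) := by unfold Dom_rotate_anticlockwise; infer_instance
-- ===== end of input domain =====

-- B changes only the algorithm for the return value; A mutates mat in place while B
-- replaces mat's contents wholesale (mat[:] = ...), so the returned VALUE is what is compared here.

-- ===== PORT A =====
-- mat[i][j] read with indices known in range (all indices come from range(...) and are < n ≤ lengths under Pre_)
def pvCell (m : List (List Int)) (i j : Nat) : Int := (m.getD i []).getD j 0
-- mat[i][j] = v  (List.set; in-range on Pre_, matching Python's in-range assignment)
def pvSetCell (m : List (List Int)) (i j : Nat) (v : Int) : List (List Int) :=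
  m.set i ((m.getD i []).set j v)
-- mat[a][b], mat[c][d] = mat[c][d], mat[a][b] : read both, then assign left-to-right
def pvSwap (m : List (List Int)) (a b c d : Nat) : List (List Int) :=
  let x := pvCell m a b
  let y := pvCell m c d
  pvSetCell (pvSetCell m a b y) c d x

def rotate_anticlockwise (mat : List (List Int)) : List (List Int) :=
  let n := mat.length
  -- Step 1: transpose (for i in range(n): for j in range(i, n): swap mat[i][j], mat[j][i])
  let m1 := (List.range n).foldl
    (fun m i => (List.range' i (n - i)).foldl (fun m j => pvSwap m i j j i) m) mat
  -- Step 2: reverse each column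
  (List.range n).foldl
    (fun m col => (List.range (n / 2)).foldl (fun m row => pvSwap m row col (n - 1 - row) col) m) m1

-- ===== PORT B =====
-- mat[:] = [[mat[j][n-1-i] for j in range(n)] for i in range(n)]; return mat
def rotate_anticlockwise_alt (mat : List (List Int)) : List (List Int) :=
  let n := mat.length
  (List.range n).map (fun i => (List.range n).map (fun j => pvCell mat j (n - 1 - i)))

-- ===== PRECONDITION & SPEC =====
-- Pre_ restricts to SQUARE matrices: on rows shorter than len(mat) A raises IndexError, and on
-- non-square inputs with longer rows A's value (rotated n×n prefix with the old row tails left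
-- in place) is an accident of its in-place swaps, not a value of "rotate a matrix".
def Pre_rotate_anticlockwise (mat : List (List Int)) : Prop :=
  ∀ row ∈ mat, row.length = mat.length
instance (mat : List (List Int)) : Decidable (Pre_rotate_anticlockwise mat) := by
  unfold Pre_rotate_anticlockwise; infer_instance

def pvWitness_rotate_anticlockwise : List (List Int) := [[1, 2], [3, 4]]

def Spec_rotate_anticlockwise (mat : List (List Int)) (out : List (List Int)) : Prop := out = rotate_anticlockwise_alt mat
instance (mat : List (List Int)) (out : List (List Int)) : Decidable (Spec_rotate_anticlockwise mat out) := by unfold Spec_rotate_anticlockwise; infer_instance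

-- ===== CLAIM (what is proved, stated in full; the proofs are below) =====
def Claim_equal_rotate_anticlockwise : Prop := ∀ (mat : List (List Int)), Dom_rotate_anticlockwise mat → Pre_rotate_anticlockwise mat → Spec_rotate_anticlockwise mat (rotate_anticlockwise mat)

-- ===== LEMMAS AND PROOFS =====

-- shape predicate: m is an n×n matrix (rows addressed through getD, as the ports read them)
def Sh (n : Nat) (m : List (List Int)) : Prop :=
  m.length = n ∧ ∀ k, k < n → (m.getD k []).length = n

lemma len_setCell (m : List (List Int)) (i j : Nat) (v : Int) :
    (pvSetCell m i j v).length = m.length := by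
  simp [pvSetCell]

lemma getD_set' {α : Type} (l : List α) (i : Nat) (x : α) (k : Nat) (d : α) :
    (l.set i x).getD k d = if k = i ∧ i < l.length then x else l.getD k d := by
  simp only [List.getD, List.getElem?_set]
  split_ifs with h1 h2 h3 h4 <;> simp_all

lemma rowlen_setCell (m : List (List Int)) (i j : Nat) (v : Int) (k : Nat) :
    ((pvSetCell m i j v).getD k []).length = (m.getD k []).length := by
  unfold pvSetCell
  rw [getD_set']
  split_ifs with h
  · simp [h.1]
  · rfl

lemma Sh_setCell {n : Nat} {m : List (List Int)} (h : Sh n m) (i j : Nat) (v : Int) :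
    Sh n (pvSetCell m i j v) := by
  refine ⟨by rw [len_setCell]; exact h.1, fun k hk => ?_⟩
  rw [rowlen_setCell]; exact h.2 k hk

lemma Sh_swap {n : Nat} {m : List (List Int)} (h : Sh n m) (a b c d : Nat) :
    Sh n (pvSwap m a b c d) :=
  Sh_setCell (Sh_setCell h a b _) c d _

lemma cell_setCell (m : List (List Int)) (i j : Nat) (v : Int) (a b : Nat) :
    pvCell (pvSetCell m i j v) a b =
      if a = i ∧ b = j ∧ i < m.length ∧ j < (m.getD i []).length then v
      else pvCell m a b := by
  unfold pvCell pvSetCell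
  rw [getD_set']
  by_cases h1 : a = i ∧ i < m.length
  · obtain ⟨rfl, hlt⟩ := h1
    rw [if_pos ⟨rfl, hlt⟩, getD_set']
    have hiff : (b = j ∧ j < (m.getD a []).length) ↔
        (a = a ∧ b = j ∧ a < m.length ∧ j < (m.getD a []).length) := by tauto
    rw [if_congr hiff rfl rfl]
  · rw [if_neg h1, if_neg (by tauto)]

lemma cell_swap {n : Nat} {m : List (List Int)} (h : Sh n m) {a b c d : Nat}
    (ha : a < n) (hb : b < n) (hc : c < n) (hd : d < n) (p q : Nat) :
    pvCell (pvSwap m a b c d) p q =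
      if p = c ∧ q = d then pvCell m a b
      else if p = a ∧ q = b then pvCell m c d
      else pvCell m p q := by
  unfold pvSwap
  have h1 : Sh n (pvSetCell m a b (pvCell m c d)) := Sh_setCell h a b _
  rw [cell_setCell, cell_setCell]
  have hma : a < m.length := h.1 ▸ ha
  have hmb : b < (m.getD a []).length := by rw [h.2 a ha]; exact hb
  have hmc : c < (pvSetCell m a b (pvCell m c d)).length := by rw [len_setCell]; exact h.1 ▸ hc
  have hmd : d < ((pvSetCell m a b (pvCell m c d)).getD c []).length := by
    rw [rowlen_setCell, h.2 c hc]; exact hd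
  split_ifs <;> tauto

lemma pvCell_congr (m : List (List Int)) {x y u v : Nat} (hx : x = u) (hy : y = v) :
    pvCell m x y = pvCell m u v := by rw [hx, hy]

-- Phase 1 inner loop: for j in range(i, i+J): swap (i,j) ↔ (j,i)
lemma inner1 (n i : Nat) (m0 : List (List Int)) (h : Sh n m0) (hi : i < n) :
    ∀ J, i + J ≤ n →
      Sh n ((List.range' i J).foldl (fun m j => pvSwap m i j j i) m0) ∧
      ∀ a b, a < n → b < n →
        pvCell ((List.range' i J).foldl (fun m j => pvSwap m i j j i) m0) a b =
          if (a = i ∧ i ≤ b ∧ b < i + J) ∨ (b = i ∧ i ≤ a ∧ a < i + J)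
          then pvCell m0 b a else pvCell m0 a b := by
  intro J
  induction J with
  | zero =>
    intro _
    refine ⟨h, fun a b ha hb => ?_⟩
    rw [if_neg (by omega)]
    simp [List.range']
  | succ J ih =>
    intro hJ
    obtain ⟨ihSh, ihCell⟩ := ih (by omega)
    rw [List.range'_concat, List.foldl_append]
    simp only [Nat.one_mul, List.foldl_cons, List.foldl_nil]
    refine ⟨Sh_swap ihSh _ _ _ _, fun a b ha hb => ?_⟩
    rw [cell_swap ihSh hi (by omega) (by omega) hi a b,
        ihCell i (i + J) hi (by omega), ihCell (i + J) i (by omega) hi, ihCell a b ha hb]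
    split_ifs <;> first | omega | exact pvCell_congr m0 (by omega) (by omega)

-- Phase 1 outer loop: transpose of the first I rows/cols
lemma phase1 (n : Nat) (mat : List (List Int)) (h : Sh n mat) :
    ∀ I, I ≤ n →
      Sh n ((List.range I).foldl
        (fun m i => (List.range' i (n - i)).foldl (fun m j => pvSwap m i j j i) m) mat) ∧
      ∀ a b, a < n → b < n →
        pvCell ((List.range I).foldl
          (fun m i => (List.range' i (n - i)).foldl (fun m j => pvSwap m i j j i) m) mat) a b =
          if min a b < I then pvCell mat b a else pvCell mat a b := by
  intro I
  induction I with
  | zero =>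
    intro _
    refine ⟨h, fun a b ha hb => ?_⟩
    rw [if_neg (by omega)]
    simp
  | succ I ih =>
    intro hI
    obtain ⟨ihSh, ihCell⟩ := ih (by omega)
    rw [List.range_succ, List.foldl_append]
    simp only [List.foldl_cons, List.foldl_nil]
    obtain ⟨sh', cell'⟩ := inner1 n I _ ihSh (by omega) (n - I) (by omega)
    refine ⟨sh', fun a b ha hb => ?_⟩
    rw [cell' a b ha hb, ihCell b a hb ha, ihCell a b ha hb]
    split_ifs <;> omega

-- Phase 2 inner loop (fixed column): for row in range(R): swap (row,col) ↔ (n-1-row,col)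
lemma inner2 (n col : Nat) (m0 : List (List Int)) (h : Sh n m0) (hcol : col < n) :
    ∀ R, R ≤ n / 2 →
      Sh n ((List.range R).foldl (fun m row => pvSwap m row col (n - 1 - row) col) m0) ∧
      ∀ a b, a < n → b < n →
        pvCell ((List.range R).foldl (fun m row => pvSwap m row col (n - 1 - row) col) m0) a b =
          if b = col ∧ (a < R ∨ n - 1 - a < R) then pvCell m0 (n - 1 - a) b else pvCell m0 a b := by
  intro R
  induction R with
  | zero =>
    intro _
    refine ⟨h, fun a b ha hb => ?_⟩
    rw [if_neg (by omega)]
    simp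
  | succ R ih =>
    intro hR
    obtain ⟨ihSh, ihCell⟩ := ih (by omega)
    rw [List.range_succ, List.foldl_append]
    simp only [List.foldl_cons, List.foldl_nil]
    have hRn : R < n := by omega
    refine ⟨Sh_swap ihSh _ _ _ _, fun a b ha hb => ?_⟩
    rw [cell_swap ihSh hRn hcol (by omega) hcol a b,
        ihCell R col hRn hcol, ihCell (n - 1 - R) col (by omega) hcol, ihCell a b ha hb]
    split_ifs <;> first | omega | exact pvCell_congr m0 (by omega) (by omega)

-- Phase 2 outer loop: columns < C have their rows reversed
lemma phase2 (n : Nat) (m1 : List (List Int)) (h : Sh n m1) :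
    ∀ C, C ≤ n →
      Sh n ((List.range C).foldl
        (fun m col => (List.range (n / 2)).foldl (fun m row => pvSwap m row col (n - 1 - row) col) m) m1) ∧
      ∀ a b, a < n → b < n →
        pvCell ((List.range C).foldl
          (fun m col => (List.range (n / 2)).foldl (fun m row => pvSwap m row col (n - 1 - row) col) m) m1) a b =
          if b < C then pvCell m1 (n - 1 - a) b else pvCell m1 a b := by
  intro C
  induction C with
  | zero =>
    intro _
    refine ⟨h, fun a b ha hb => ?_⟩
    rw [if_neg (by omega)]
    simp
  | succ C ih =>
    intro hC
    obtain ⟨ihSh, ihCell⟩ := ih (by omega)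
    rw [List.range_succ, List.foldl_append]
    simp only [List.foldl_cons, List.foldl_nil]
    obtain ⟨sh', cell'⟩ := inner2 n C _ ihSh (by omega) (n / 2) le_rfl
    refine ⟨sh', fun a b ha hb => ?_⟩
    rw [cell' a b ha hb, ihCell (n - 1 - a) b (by omega) hb, ihCell a b ha hb]
    split_ifs <;> first | omega | exact pvCell_congr m1 (by omega) (by omega)

lemma Sh_of_pre (mat : List (List Int)) (h : Pre_rotate_anticlockwise mat) :
    Sh mat.length mat := by
  refine ⟨rfl, fun k hk => ?_⟩
  have : mat.getD k [] = mat[k] := by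
    simp [List.getD, List.getElem?_eq_getElem hk]
  rw [this]
  exact h _ (List.getElem_mem hk)

lemma getD_eq_getElem {α : Type} [Inhabited α] (l : List α) (i : Nat) (hi : i < l.length) (d : α) :
    l.getD i d = l[i] := by
  simp [List.getD, List.getElem?_eq_getElem hi]

-- ===== VERDICT (by name: the statement is the Claim_ definition above) =====
theorem rotate_anticlockwise_spec : Claim_equal_rotate_anticlockwise := by
  intro mat _ hpre
  unfold Spec_rotate_anticlockwise rotate_anticlockwise rotate_anticlockwise_alt
  set n := mat.length with hn
  have hSh : Sh n mat := Sh_of_pre mat hpre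
  obtain ⟨sh1, cell1⟩ := phase1 n mat hSh n le_rfl
  obtain ⟨sh2, cell2⟩ := phase2 n _ sh1 n le_rfl
  set M := (List.range n).foldl
    (fun m col => (List.range (n / 2)).foldl (fun m row => pvSwap m row col (n - 1 - row) col) m)
    ((List.range n).foldl
      (fun m i => (List.range' i (n - i)).foldl (fun m j => pvSwap m i j j i) m) mat) with hM
  apply List.ext_getElem
  · simp [sh2.1]
  · intro a h1 h2
    have ha : a < n := by rw [← sh2.1]; exact h1
    apply List.ext_getElem
    · have := sh2.2 a ha
      rw [getD_eq_getElem _ a h1] at this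
      simp [this]
    · intro b hb1 hb2
      have hblen : (M.getD a []).length = n := sh2.2 a ha
      have hb : b < n := by
        rw [← hblen, getD_eq_getElem _ a h1]; exact hb1
      have hcell : pvCell M a b = pvCell mat b (n - 1 - a) := by
        rw [cell2 a b ha hb, if_pos hb, cell1 (n - 1 - a) b (by omega) hb, if_pos (by omega)]
      have hLHS : M[a][b] = pvCell M a b := by
        unfold pvCell
        rw [getD_eq_getElem _ a h1, getD_eq_getElem _ b hb1]
      rw [hLHS, hcell]
      simp [List.getElem_map, List.getElem_range]

-- (end)
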